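-- pv_equiv track=rewrite | github.com/EliseyP/ooHbReporter | HbReportFromClipboard.py | table_get_remove_empty_columns
-- ===== SOURCE A (Python) =====
-- def table_get_remove_empty_columns(_data):
--     _rows_amount = len(_data)
--     _cols_amount = len(_data[0])
--     _empty_columns_list = []
--     for _col_ind in range(1, _cols_amount):
--         _column_is_empty = True
--         for _row_ind in range(1, _rows_amount):
--             _value = _data[_row_ind][_col_ind]
--             if _value and _value != '0':
--                 _column_is_empty = False
--         if _column_is_empty:
--             _empty_columns_list.append(_col_ind)
--     return _empty_columns_list
-- ===== SOURCE B (Python) =====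
-- def table_get_remove_empty_columns(_data):
--     _cols_amount = len(_data[0])
--     _candidates = [True] * _cols_amount
--     for _row in _data[1:]:
--         for _col_ind in range(1, _cols_amount):
--             _value = _row[_col_ind]
--             if _value and _value != '0':
--                 _candidates[_col_ind] = False
--     return [_col_ind for _col_ind in range(1, _cols_amount) if _candidates[_col_ind]]
-- ===== Notes on version B (the rewrite author's own statement) =====
-- stated objective: faster
-- what changed: Replaces A's column-major nesting (re-indexing _data[row][col] for every column over every row) with a single row-major pass over the row lists that maintains a boolean array of still-empty candidate columns, then emits the surviving indices.
-- outside the precondition, e.g. on table_get_remove_empty_columns([]): A raises IndexError, B raises IndexError; on table_get_remove_empty_columns([['a', 'b'], ['c']]): A raises IndexError, B raises IndexError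
import Mathlib
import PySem

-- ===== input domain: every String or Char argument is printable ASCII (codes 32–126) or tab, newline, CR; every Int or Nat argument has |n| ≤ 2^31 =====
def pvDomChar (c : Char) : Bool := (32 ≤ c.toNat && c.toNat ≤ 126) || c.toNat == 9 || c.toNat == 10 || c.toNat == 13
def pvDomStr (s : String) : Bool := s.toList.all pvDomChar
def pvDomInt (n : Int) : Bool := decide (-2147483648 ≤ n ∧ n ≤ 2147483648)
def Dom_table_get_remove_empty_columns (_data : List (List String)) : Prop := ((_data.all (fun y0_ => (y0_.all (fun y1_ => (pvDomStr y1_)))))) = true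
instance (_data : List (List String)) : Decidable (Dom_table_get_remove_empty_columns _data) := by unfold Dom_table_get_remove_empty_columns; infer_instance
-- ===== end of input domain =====

-- B replaces A's column-major re-scans by one row-major pass over a boolean array of
-- still-empty candidate columns (alternative decomposition; return value only, no mutation).

-- ===== PORT A =====
def table_get_remove_empty_columns (_data : List (List String)) : List Int :=
  let _rows_amount : Int := _data.length
  let _cols_amount : Int := (PySem.List.pyGetD _data 0 []).length
  (PySem.List.pyRange 1 _cols_amount 1).foldl (fun _empty_columns_list _col_ind =>
    let _column_is_empty :=
      (PySem.List.pyRange 1 _rows_amount 1).foldl (fun b _row_ind =>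
        let _value := PySem.List.pyGetD (PySem.List.pyGetD _data _row_ind []) _col_ind ""
        if _value ≠ "" ∧ _value ≠ "0" then false else b) true
    if _column_is_empty then _empty_columns_list ++ [_col_ind] else _empty_columns_list) []

-- ===== PORT B =====
def table_get_remove_empty_columns_alt (_data : List (List String)) : List Int :=
  let _cols_amount : Int := (PySem.List.pyGetD _data 0 []).length
  let _candidates : List Bool :=
    (_data.drop 1).foldl (fun cand _row =>
      (PySem.List.pyRange 1 _cols_amount 1).foldl (fun cand _col_ind =>
        let _value := PySem.List.pyGetD _row _col_ind ""
        if _value ≠ "" ∧ _value ≠ "0" then cand.set _col_ind.toNat false else cand) cand)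
      (List.replicate _cols_amount.toNat true)
  (PySem.List.pyRange 1 _cols_amount 1).filter (fun _col_ind => _candidates.getD _col_ind.toNat false)

-- ===== PRECONDITION & SPEC =====
-- Pre_: A raises IndexError on empty _data (len(_data[0])) and, when there are at
-- least two columns, on any later row shorter than the first row; exactly those
-- inputs are excluded (B raises there too).
def Pre_table_get_remove_empty_columns (_data : List (List String)) : Prop :=
  _data ≠ [] ∧ ((_data.headD []).length ≤ 1 ∨ ∀ row ∈ _data.tail, (_data.headD []).length ≤ row.length)
instance (_data : List (List String)) : Decidable (Pre_table_get_remove_empty_columns _data) := by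
  unfold Pre_table_get_remove_empty_columns; infer_instance
def pvWitness_table_get_remove_empty_columns : List (List String) := [["h1","h2","h3"],["a","","0"],["b","0",""]]
def Spec_table_get_remove_empty_columns (_data : List (List String)) (out : List Int) : Prop := out = table_get_remove_empty_columns_alt _data
instance (_data : List (List String)) (out : List Int) : Decidable (Spec_table_get_remove_empty_columns _data out) := by unfold Spec_table_get_remove_empty_columns; infer_instance

-- ===== CLAIM (what is proved, stated in full; the proofs are below) =====
def Claim_equal_table_get_remove_empty_columns : Prop := ∀ (_data : List (List String)), Dom_table_get_remove_empty_columns _data → Pre_table_get_remove_empty_columns _data → Spec_table_get_remove_empty_columns _data (table_get_remove_empty_columns _data)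

-- ===== LEMMAS AND PROOFS =====

-- the cell test shared by both programs
def pvHit (row : List String) (c : Int) : Bool :=
  let v := PySem.List.pyGetD row c ""
  v ≠ "" && v ≠ "0"


-- inner fold of A: absorbing-false accumulator is an 'all'
theorem pv_foldl_absorb (L : List (List String)) (c : Int) (b : Bool) :
    L.foldl (fun b row => if pvHit row c then false else b) b
      = (b && L.all (fun row => !pvHit row c)) := by
  induction L generalizing b with
  | nil => simp
  | cons r rs ih =>
    simp only [List.foldl_cons, List.all_cons, ih]
    by_cases h : pvHit r c = true <;> simp [h]

-- the Prop-valued cell test of the ports, as the Bool pvHit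
theorem pv_hit_iff (row : List String) (c : Int) :
    (PySem.List.pyGetD row c "" ≠ "" ∧ PySem.List.pyGetD row c "" ≠ "0") ↔ pvHit row c = true := by
  simp [pvHit]

-- getD after a set-to-false
theorem pv_getD_set_false (cand : List Bool) (j i : Nat) :
    (cand.set j false)[i]?.getD false = if j = i then false else cand[i]?.getD false := by
  rw [List.getElem?_set']
  by_cases h : j = i
  · cases cand[i]? <;> simp [h]
  · simp [h]

-- inner fold of B: what survives in the candidate array after one row
theorem pv_inner_getD (Q : Int → Bool) (L : List Int) (cand : List Bool) (i : Nat) :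
    (L.foldl (fun cd c => if Q c then cd.set c.toNat false else cd) cand).getD i false
      = (cand.getD i false && !(L.any (fun c => c.toNat == i && Q c))) := by
  induction L generalizing cand with
  | nil => simp
  | cons c L ih =>
    simp only [List.foldl_cons, List.any_cons, ih, List.getD_eq_getElem?_getD]
    by_cases hq : Q c = true
    · by_cases hi : c.toNat = i
      · simp [hq, hi, pv_getD_set_false]
      · have hb : (c.toNat == i) = false := by simp [hi]
        simp [hq, hb, hi]
    · simp [hq]

-- outer fold of B over the rows
theorem pv_outer_getD (cols : Int) (rows : List (List String)) (cand : List Bool) (i : Nat) :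
    (rows.foldl (fun cand row =>
        (PySem.List.pyRange 1 cols 1).foldl (fun cd c =>
          if pvHit row c then cd.set c.toNat false else cd) cand) cand).getD i false
      = (cand.getD i false &&
         !(rows.any (fun row => (PySem.List.pyRange 1 cols 1).any
             (fun c => c.toNat == i && pvHit row c)))) := by
  induction rows generalizing cand with
  | nil => simp
  | cons r rs ih =>
    simp only [List.foldl_cons, List.any_cons, ih, pv_inner_getD]
    by_cases h : (PySem.List.pyRange 1 cols 1).any (fun c => c.toNat == i && pvHit r c) = true
    · simp [h]
    · simp [h]

-- for c in the range, 'some range element with the same toNat hits' is just 'c hits'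
theorem pv_any_at (cols c : Int) (row : List String) (h1 : 1 ≤ c) (h2 : c < cols) :
    (PySem.List.pyRange 1 cols 1).any (fun c' => c'.toNat == c.toNat && pvHit row c')
      = pvHit row c := by
  rcases hb : pvHit row c with _ | _
  · simp only [List.any_eq_false]
    intro c' hc'
    rw [PySem.List.mem_pyRange_one] at hc'
    by_cases he : c' = c
    · subst he; simp [hb]
    · have : c'.toNat ≠ c.toNat := by omega
      simp [this]
  · simp only [List.any_eq_true]
    exact ⟨c, by rw [PySem.List.mem_pyRange_one]; omega, by simp [hb]⟩

theorem table_get_remove_empty_columns_spec : Claim_equal_table_get_remove_empty_columns := by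
  intro _data _ _
  show table_get_remove_empty_columns _data = table_get_remove_empty_columns_alt _data
  unfold table_get_remove_empty_columns table_get_remove_empty_columns_alt
  simp only [pv_hit_iff]
  rw [PySem.List.foldl_append_ite_eq_filter, List.nil_append]
  apply Eq.symm
  apply List.filter_congr
  intro c hc
  rw [PySem.List.mem_pyRange_one] at hc
  have hfold :
      (PySem.List.pyRange 1 (_data.length : Int) 1).foldl (fun b _row_ind =>
          if pvHit (PySem.List.pyGetD _data _row_ind []) c then false else b) true
        = (_data.drop 1).foldl (fun b row => if pvHit row c then false else b) true := by
    have h := PySem.List.foldl_pyRange_pyGetD' _data ([] : List String)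
        (fun b row => if pvHit row c then false else b) true (a := 1) (by omega)
    simpa using h
  rw [pv_outer_getD, hfold, pv_foldl_absorb]
  simp only [show ∀ row, (PySem.List.pyRange 1 ((PySem.List.pyGetD _data 0 []).length : Int) 1).any
      (fun c' => c'.toNat == c.toNat && pvHit row c') = pvHit row c
    from fun row => pv_any_at _ c row hc.1 hc.2]
  have hrep : (List.replicate (((PySem.List.pyGetD _data 0 []).length : Int)).toNat true)[c.toNat]?.getD false = true := by
    rw [List.getElem?_replicate]
    have h3 : c.toNat < (PySem.List.pyGetD _data 0 []).length := by omega
    simp [h3]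
  rw [List.getD_eq_getElem?_getD, hrep, Bool.true_and]
  by_cases h : ∀ x ∈ _data.tail, pvHit x c = false
  · have h2 : _data.tail.any (fun row => pvHit row c) = false :=
      List.any_eq_false.mpr (fun x hx => by simp [h x hx])
    simp [h2]
    exact h
  · have h2 : _data.tail.any (fun row => pvHit row c) = true := by
      rw [List.any_eq_true]
      simp only [not_forall] at h
      obtain ⟨x, hx, hp⟩ := h
      exact ⟨x, hx, by simpa using hp⟩
    simp [h2]
    exact List.any_eq_true.mp h2
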